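-- pv_equiv track=rewrite | github.com/asottile/reorder-python-imports | reorder_python_imports.py | _most_common_line_ending
-- ===== SOURCE A (Python) =====
-- import collections
--
-- def _most_common_line_ending(s: str) -> str:
--     # initialize in case there's no line endings at all
--     counts = collections.Counter({'\n': 0})
--     for line in s.splitlines(True):
--         for ending in ('\r\n', '\r', '\n'):
--             if line.endswith(ending):
--                 counts[ending] += 1
--                 break
--     return counts.most_common(1)[0][0]
-- ===== SOURCE B (Python) =====
-- import collections
--
-- def _most_common_line_ending(s: str) -> str:
--     # one direct index scan over the string: count '\r\n', '\r', '\n' tokens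
--     # without building the intermediate list of lines
--     counts = collections.Counter({'\n': 0})
--     i, n = 0, len(s)
--     while i < n:
--         c = s[i]
--         if c == '\r':
--             if i + 1 < n and s[i + 1] == '\n':
--                 counts['\r\n'] += 1
--                 i += 2
--                 continue
--             counts['\r'] += 1
--         elif c == '\n':
--             counts['\n'] += 1
--         i += 1
--     return counts.most_common(1)[0][0]
-- ===== Notes on version B (the rewrite author's own statement) =====
-- stated objective: simpler
-- what changed: Replaced splitlines(True) plus a per-line endswith/break loop over the three candidate endings with a single index scan that counts CRLF, CR and LF tokens directly, never materialising the list of lines.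
import Mathlib
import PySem

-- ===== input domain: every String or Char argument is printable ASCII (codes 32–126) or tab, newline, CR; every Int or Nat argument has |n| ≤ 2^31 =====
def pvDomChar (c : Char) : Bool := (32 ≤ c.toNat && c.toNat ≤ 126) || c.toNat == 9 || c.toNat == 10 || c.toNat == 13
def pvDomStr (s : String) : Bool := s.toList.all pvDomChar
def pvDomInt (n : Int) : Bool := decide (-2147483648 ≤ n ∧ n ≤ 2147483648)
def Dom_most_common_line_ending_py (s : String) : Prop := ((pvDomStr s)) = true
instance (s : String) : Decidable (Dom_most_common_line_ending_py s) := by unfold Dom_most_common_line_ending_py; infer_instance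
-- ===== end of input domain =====

-- B replaces splitlines(True) + a per-line endswith/break loop by a single index scan
-- counting the '\r\n' / '\r' / '\n' tokens directly (objective: simpler, no list of lines).

-- ===== PORT A =====
-- s.splitlines(True): exact on Dom (printable ASCII + tab/CR/LF), where the only
-- line boundaries Python recognises are '\r\n', '\r', '\n'.
def pvSplitKE (cs : List Char) (acc : List Char) : List (List Char) :=
  match cs with
  | [] => if acc = [] then [] else [acc.reverse]
  | '\r' :: '\n' :: rest => (acc.reverse ++ ['\r', '\n']) :: pvSplitKE rest []
  | '\r' :: rest => (acc.reverse ++ ['\r']) :: pvSplitKE rest []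
  | '\n' :: rest => (acc.reverse ++ ['\n']) :: pvSplitKE rest []
  | c :: rest => pvSplitKE rest (c :: acc)

-- the inner `for ending in ('\r\n','\r','\n'): if line.endswith(ending): counts[ending]+=1; break`
def pvCountLine (d : PySem.Dict (List Char) Int) (line : List Char) : PySem.Dict (List Char) Int :=
  if PySem.Chars.endswith line ['\r', '\n'] then d.modify ['\r', '\n'] 0 (· + 1)
  else if PySem.Chars.endswith line ['\r'] then d.modify ['\r'] 0 (· + 1)
  else if PySem.Chars.endswith line ['\n'] then d.modify ['\n'] 0 (· + 1)
  else d

-- counts.most_common(1)[0][0]: first key (insertion order) attaining the maximal count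
def pvMostCommon1 (best : List Char × Int) : List (List Char × Int) → List Char
  | [] => best.1
  | p :: rest => pvMostCommon1 (if best.2 < p.2 then p else best) rest

def most_common_line_ending_py (s : String) : String :=
  match ((pvSplitKE s.toList []).foldl pvCountLine (PySem.Dict.ofList [(['\n'], 0)])).items with
  | [] => ""            -- unreachable: counts holds the seeded '\n' key
  | p :: rest => String.ofList (pvMostCommon1 p rest)

-- ===== PORT B =====
-- the while-loop index scan of Source B, counting ending tokens directly
def pvScan (cs : List Char) (d : PySem.Dict (List Char) Int) : PySem.Dict (List Char) Int :=
  match cs with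
  | [] => d
  | '\r' :: '\n' :: rest => pvScan rest (d.modify ['\r', '\n'] 0 (· + 1))
  | '\r' :: rest => pvScan rest (d.modify ['\r'] 0 (· + 1))
  | '\n' :: rest => pvScan rest (d.modify ['\n'] 0 (· + 1))
  | _ :: rest => pvScan rest d

def most_common_line_ending_py_alt (s : String) : String :=
  match (pvScan s.toList (PySem.Dict.ofList [(['\n'], 0)])).items with
  | [] => ""            -- unreachable: counts holds the seeded '\n' key
  | p :: rest => String.ofList (pvMostCommon1 p rest)

-- ===== PRECONDITION & SPEC =====
def Spec_most_common_line_ending_py (s : String) (out : String) : Prop := out = most_common_line_ending_py_alt s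
instance (s : String) (out : String) : Decidable (Spec_most_common_line_ending_py s out) := by unfold Spec_most_common_line_ending_py; infer_instance

-- ===== CLAIM (what is proved, stated in full; the proofs are below) =====
def Claim_equal_most_common_line_ending_py : Prop := ∀ (s : String), Dom_most_common_line_ending_py s → Spec_most_common_line_ending_py s (most_common_line_ending_py s)

-- ===== LEMMAS AND PROOFS =====

theorem pv_not_endswith (xs e : List Char) (c : Char) (hc : c ∈ e) (hn : c ∉ xs) :
    PySem.Chars.endswith xs e = false := by
  by_contra h
  have h' : PySem.Chars.endswith xs e = true := by
    cases hb : PySem.Chars.endswith xs e with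
    | false => exact absurd hb h
    | true => rfl
  exact hn (((PySem.Chars.endswith_iff xs e).mp h').subset hc)

theorem pv_endswith_append (xs e : List Char) :
    PySem.Chars.endswith (xs ++ e) e = true :=
  (PySem.Chars.endswith_iff _ _).mpr (List.suffix_append xs e)

theorem pv_key (cs acc : List Char) (d : PySem.Dict (List Char) Int)
    (hacc : '\r' ∉ acc ∧ '\n' ∉ acc) :
    (pvSplitKE cs acc).foldl pvCountLine d = pvScan cs d := by
  induction cs, acc using pvSplitKE.induct generalizing d with
  | case1 =>
    simp [pvSplitKE, pvScan]
  | case2 acc hne =>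
    simp [pvSplitKE, pvScan, hne, pvCountLine,
      pv_not_endswith acc.reverse ['\r', '\n'] '\n' (by simp) (by simp [hacc.2]),
      pv_not_endswith acc.reverse ['\r'] '\r' (by simp) (by simp [hacc.1]),
      pv_not_endswith acc.reverse ['\n'] '\n' (by simp) (by simp [hacc.2])]
  | case3 acc rest ih =>
    simp [pvSplitKE, pvScan, pvCountLine, pv_endswith_append, ih _ ⟨by simp, by simp⟩]
  | case4 acc rest h1 ih =>
    -- '\r' :: rest, rest does not start with '\n'
    simp only [pvSplitKE, List.foldl_cons]
    rw [ih _ ⟨by simp, by simp⟩]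
    have h2 : PySem.Chars.endswith (acc.reverse ++ ['\r']) ['\r', '\n'] = false :=
      pv_not_endswith _ _ '\n' (by simp) (by simp [hacc.2])
    simp only [pvCountLine, h2, pv_endswith_append acc.reverse ['\r'], if_true,
      Bool.false_eq_true, if_false]
    cases rest with
    | nil => simp [pvScan]
    | cons c rs =>
      have hc : c ≠ '\n' := fun h => h1 rs (by rw [h])
      simp [pvScan]
  | case5 acc rest ih =>
    have h2 : PySem.Chars.endswith (acc.reverse ++ ['\n']) ['\r', '\n'] = false :=
      pv_not_endswith _ _ '\r' (by simp) (by simp [hacc.1])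
    have h3 : PySem.Chars.endswith (acc.reverse ++ ['\n']) ['\r'] = false :=
      pv_not_endswith _ _ '\r' (by simp) (by simp [hacc.1])
    simp [pvSplitKE, pvScan, pvCountLine, h2, h3, pv_endswith_append acc.reverse ['\n'],
      ih _ ⟨by simp, by simp⟩]
  | case6 acc c rest h1 h2 h3 ih =>
    have hr : c ≠ '\r' := fun h => h2 h
    have hn : c ≠ '\n' := fun h => h3 h
    simp only [pvSplitKE]
    rw [ih d ⟨by simp [hacc.1, Ne.symm hr], by simp [hacc.2, Ne.symm hn]⟩]
    cases rest with
    | nil => simp [pvScan]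
    | cons c2 rs =>
      by_cases hc2 : c2 = '\n' <;> simp [pvScan, hr, hc2]

-- ===== VERDICT (by name: the statement is the Claim_ definition above) =====
theorem most_common_line_ending_py_spec : Claim_equal_most_common_line_ending_py := by
  intro s _
  unfold Spec_most_common_line_ending_py most_common_line_ending_py most_common_line_ending_py_alt
  rw [pv_key s.toList [] _ ⟨by simp, by simp⟩]
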